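-- pv_equiv track=rewrite | github.com/eduardomottoni/_UoP | Introduction to computer science/weeks 1-4/Exercice from textbook.py | is_power
-- ===== SOURCE A (Python) =====
-- def is_divisible(x, y):
--     return x % y == 0
--
-- def is_power(x, y):
--     x = int(x)
--     y = int(y)
--     if y == 1:
--         #Potential is True for every exponential when it is 1
--         return True
--     elif x == y:
--         #Verify if are equal before beggin recursions
--         return False
--     elif is_divisible(x, y) == True :
--         x = x/y
--         if x == y:
--             #Verify if are equal after some iteration
--             return True
--         return is_power(x, y)
--     else:
--         return False
-- ===== SOURCE B (Python) =====
-- def is_power(x, y):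
--     # multiply-up instead of divide-down: build powers y^2, y^3, ... and compare
--     x = int(x)
--     y = int(y)
--     if y == 1:
--         return True
--     if x == y:
--         return False
--     p = y * y
--     while p != x and abs(p) < abs(x):
--         p *= y
--     return p == x
-- ===== Notes on version B (the rewrite author's own statement) =====
-- stated objective: alternative
-- what changed: Replaces the divide-and-recurse scan (mod test, float division, reconversion each step) with an iterative multiply-up loop that builds the powers y^2, y^3, ... and compares them against x, using no division or modulo at all.
import Mathlib
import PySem

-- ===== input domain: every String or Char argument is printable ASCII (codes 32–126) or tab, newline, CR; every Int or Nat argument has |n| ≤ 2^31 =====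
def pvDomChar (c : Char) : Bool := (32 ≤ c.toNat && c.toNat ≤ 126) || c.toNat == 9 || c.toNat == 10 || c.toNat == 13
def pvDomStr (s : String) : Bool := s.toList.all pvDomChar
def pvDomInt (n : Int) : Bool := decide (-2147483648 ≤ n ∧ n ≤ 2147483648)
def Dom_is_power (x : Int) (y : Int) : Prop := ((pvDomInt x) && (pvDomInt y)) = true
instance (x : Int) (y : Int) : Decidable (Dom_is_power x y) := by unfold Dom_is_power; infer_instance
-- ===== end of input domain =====

-- B replaces A's divide-and-recurse scan by an iterative multiply-up loop over the powers y^2, y^3, …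
-- (no division/modulo); equivalence is proved on Pre_, which excludes exactly the inputs where A raises
-- or recurses forever.

-- ===== PORT A =====
def is_divisible (x : Int) (y : Int) : Bool := PySem.Int.mod x y == 0

-- fuel recursion (x.natAbs + 2 steps suffice on Pre_); fuel is a totality guard only.
-- 'x = x/y' is float division in Python, but it only happens when y divides x, where it is the exact
-- integer quotient (inside Dom the float is exact), so it is ported as floordiv; 'int(x)' is then the identity.
def is_power_go : Nat → Int → Int → Bool
  | 0, _, _ => false
  | n+1, x, y =>
    if y == 1 then true
    else if x == y then false
    else if is_divisible x y == true then
      let x' := PySem.Int.floordiv x y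
      if x' == y then true else is_power_go n x' y
    else false

def is_power (x : Int) (y : Int) : Bool := is_power_go (x.natAbs + 2) x y

-- ===== PORT B =====
-- while p != x and abs(p) < abs(x): p *= y   (fuel is a totality guard; x.natAbs + 2 suffices on Pre_)
def is_power_alt_loop : Nat → Int → Int → Int → Bool
  | 0, _, _, _ => false
  | n+1, p, x, y =>
    if p ≠ x ∧ |p| < |x| then is_power_alt_loop n (p * y) x y
    else p == x

def is_power_alt (x : Int) (y : Int) : Bool :=
  if y == 1 then true
  else if x == y then false
  else is_power_alt_loop (x.natAbs + 2) (y * y) x y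

-- ===== PRECONDITION & SPEC =====
-- Pre_ excludes exactly the inputs where A does not return: y = 0 with x ≠ 0 (ZeroDivisionError),
-- x = 0 with y ∉ {0,1} and y = -1 with x ∉ {1,-1} (infinite recursion / RecursionError).
def Pre_is_power (x : Int) (y : Int) : Prop :=
  ¬(y = 0 ∧ x ≠ 0) ∧ ¬(x = 0 ∧ y ≠ 0 ∧ y ≠ 1) ∧ ¬(y = -1 ∧ x ≠ 1 ∧ x ≠ -1)
instance (x : Int) (y : Int) : Decidable (Pre_is_power x y) := by unfold Pre_is_power; infer_instance

def pvWitness_is_power : Int × Int := (8, 2)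

def Spec_is_power (x : Int) (y : Int) (out : Bool) : Prop := out = is_power_alt x y
instance (x : Int) (y : Int) (out : Bool) : Decidable (Spec_is_power x y out) := by unfold Spec_is_power; infer_instance

-- ===== CLAIM (what is proved, stated in full; the proofs are below) =====
def Claim_equal_is_power : Prop := ∀ (x : Int) (y : Int), Dom_is_power x y → Pre_is_power x y → Spec_is_power x y (is_power x y)

-- ===== LEMMAS AND PROOFS =====

-- no power y^k, k ≥ 2, can equal y itself when |y| ≥ 2
lemma abs_lt_abs_iff (p x : Int) : |p| < |x| ↔ p.natAbs < x.natAbs := by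
  rw [Int.abs_eq_natAbs, Int.abs_eq_natAbs]
  exact_mod_cast Iff.rfl

lemma no_pow_self (y : Int) (hy : 2 ≤ y.natAbs) (k : Nat) (hk : 2 ≤ k) : y ^ k ≠ y := by
  intro h
  have h1 : (y ^ k).natAbs = y.natAbs ^ k := by
    simpa using Int.natAbs_pow y k
  have h2 : y.natAbs ^ k ≥ y.natAbs * y.natAbs := by
    calc y.natAbs ^ k ≥ y.natAbs ^ 2 :=
          Nat.pow_le_pow_right (by omega) hk
      _ = y.natAbs * y.natAbs := by ring
  have h3 : (y ^ k).natAbs = y.natAbs := by rw [h]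
  have h4 : 2 * y.natAbs ≤ y.natAbs * y.natAbs := Nat.mul_le_mul hy (le_refl _)
  omega

-- A's recursion computes "x is y^k for some k ≥ 2" (given |y| ≥ 2, x ≠ 0, enough fuel)
lemma goA_char (y : Int) (hy : 2 ≤ y.natAbs) :
    ∀ n x, x ≠ 0 → x.natAbs ≤ n + 1 →
      (is_power_go (n+1) x y = true ↔ ∃ k, 2 ≤ k ∧ y ^ k = x) := by
  have hy1 : y ≠ 1 := by intro h; subst h; simp at hy
  have hy0 : y ≠ 0 := by intro h; subst h; simp at hy
  intro n
  induction n with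
  | zero =>
    intro x hx hle
    simp only [is_power_go]
    rw [if_neg (by simpa using hy1)]
    by_cases hxy : x = y
    · rw [if_pos (by simp [hxy])]
      constructor
      · intro h; simp at h
      · rintro ⟨k, hk, hpow⟩; exact absurd (hxy ▸ hpow) (no_pow_self y hy k hk)
    · rw [if_neg (by simpa using hxy)]
      by_cases hdvd : y ∣ x
      · -- y ∣ x with |y| ≥ 2 and x ≠ 0 forces |x| ≥ 2, contradicting |x| ≤ 1
        exfalso
        rcases hdvd with ⟨c, hc⟩
        have hc0 : c ≠ 0 := by rintro rfl; simp at hc; exact hx hc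
        have he : x.natAbs = y.natAbs * c.natAbs := by rw [hc, Int.natAbs_mul]
        have hc1 : 1 ≤ c.natAbs := Nat.one_le_iff_ne_zero.mpr (by simpa using hc0)
        have : 2 * 1 ≤ y.natAbs * c.natAbs := Nat.mul_le_mul hy hc1
        omega
      · have hm : ¬ (is_divisible x y == true) = true := by
          simp [is_divisible, PySem.Int.mod_eq_zero_iff_dvd, hdvd]
        rw [if_neg hm]
        constructor
        · intro h; simp at h
        · rintro ⟨k, hk, hpow⟩
          refine absurd ⟨y ^ (k-1), ?_⟩ hdvd
          have hk' : k - 1 + 1 = k := by omega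
          rw [← hpow]
          conv_lhs => rw [← hk']
          rw [pow_succ']
  | succ m ih =>
    intro x hx hle
    rw [is_power_go]
    rw [if_neg (by simpa using hy1)]
    by_cases hxy : x = y
    · rw [if_pos (by simp [hxy])]
      constructor
      · intro h; simp at h
      · rintro ⟨k, hk, hpow⟩; exact absurd (hxy ▸ hpow) (no_pow_self y hy k hk)
    · rw [if_neg (by simpa using hxy)]
      by_cases hdvd : y ∣ x
      · have hm : (is_divisible x y == true) = true := by
          simp [is_divisible, PySem.Int.mod_eq_zero_iff_dvd, hdvd]
        rw [if_pos hm]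
        have hq : PySem.Int.floordiv x y * y = x := by
          have := PySem.Int.floordiv_mul_add_mod x y
          rw [(PySem.Int.mod_eq_zero_iff_dvd x y).mpr hdvd] at this
          omega
        set q := PySem.Int.floordiv x y with hqdef
        have hq0 : q ≠ 0 := by intro h; rw [h] at hq; simp at hq; exact hx hq.symm
        have hqlt : q.natAbs < x.natAbs := by
          have h1 : x.natAbs = q.natAbs * y.natAbs := by rw [← hq, Int.natAbs_mul]
          have h2 : 1 ≤ q.natAbs := Nat.one_le_iff_ne_zero.mpr (by simpa using hq0)
          have h3 : q.natAbs * 2 ≤ q.natAbs * y.natAbs := Nat.mul_le_mul (le_refl _) hy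
          omega
        by_cases hqy : q = y
        · rw [if_pos (by simpa using hqy)]
          constructor
          · intro _; exact ⟨2, le_refl 2, by rw [pow_two, ← hq, hqy]⟩
          · intro _; rfl
        · rw [if_neg (by simpa using hqy)]
          rw [ih q hq0 (by omega)]
          constructor
          · rintro ⟨k, hk, hpow⟩
            refine ⟨k + 1, by omega, ?_⟩
            rw [pow_succ, hpow, hq]
          · rintro ⟨k, hk, hpow⟩
            have hk1 : k - 1 + 1 = k := by omega
            have hcan : y ^ (k - 1) = q := by
              have h' : y ^ (k - 1) * y = q * y := by
                rw [← pow_succ, hk1, hpow, hq]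
              exact mul_right_cancel₀ hy0 h'
            have hkne2 : k ≠ 2 := by
              intro h2
              apply hqy
              rw [← hcan, h2]
              norm_num
            exact ⟨k - 1, by omega, hcan⟩
      · have hm : ¬ (is_divisible x y == true) = true := by
          simp [is_divisible, PySem.Int.mod_eq_zero_iff_dvd, hdvd]
        rw [if_neg hm]
        constructor
        · intro h; simp at h
        · rintro ⟨k, hk, hpow⟩
          refine absurd ⟨y ^ (k-1), ?_⟩ hdvd
          have hk' : k - 1 + 1 = k := by omega
          rw [← hpow]
          conv_lhs => rw [← hk']
          rw [pow_succ']

-- B's loop computes "x is y^j * p for some j ≥ 0" (given |y| ≥ 2, p ≠ 0, enough fuel)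
lemma loopB_char (x y : Int) (hy : 2 ≤ y.natAbs) (hx : x ≠ 0) :
    ∀ n p, p ≠ 0 → x.natAbs ≤ n + p.natAbs →
      (is_power_alt_loop (n+1) p x y = true ↔ ∃ j : Nat, y ^ j * p = x) := by
  have no_hi : ∀ p : Int, p ≠ 0 → x.natAbs ≤ p.natAbs →
      ((∃ j : Nat, y ^ j * p = x) ↔ p = x) := by
    intro p hp hle
    constructor
    · rintro ⟨j, hj⟩
      rcases Nat.eq_zero_or_pos j with hj0 | hj0
      · subst hj0; simpa using hj
      · exfalso
        have h1 : x.natAbs = y.natAbs ^ j * p.natAbs := by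
          rw [← hj, Int.natAbs_mul, Int.natAbs_pow]
        have h2 : 2 ^ j ≤ y.natAbs ^ j := Nat.pow_le_pow_left hy j
        have h3 : 2 ≤ 2 ^ j := by
          calc 2 = 2 ^ 1 := by norm_num
            _ ≤ 2 ^ j := Nat.pow_le_pow_right (by norm_num) hj0
        have h4 : 1 ≤ p.natAbs := Nat.one_le_iff_ne_zero.mpr (by simpa using hp)
        have h5 : 2 * p.natAbs ≤ y.natAbs ^ j * p.natAbs :=
          Nat.mul_le_mul (h3.trans h2) (le_refl _)
        omega
    · intro h; exact ⟨0, by simpa using h⟩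
  intro n
  induction n with
  | zero =>
    intro p hp hle
    simp only [is_power_alt_loop]
    have hcond : ¬ (p ≠ x ∧ |p| < |x|) := by
      rintro ⟨_, habs⟩
      rw [abs_lt_abs_iff p x] at habs
      omega
    rw [if_neg hcond, no_hi p hp (by omega)]
    simp
  | succ m ih =>
    intro p hp hle
    rw [is_power_alt_loop]
    by_cases hcond : p ≠ x ∧ |p| < |x|
    · rw [if_pos hcond]
      have habs : p.natAbs < x.natAbs := by
        rw [← abs_lt_abs_iff p x]; exact hcond.2
      have hp' : p * y ≠ 0 := mul_ne_zero hp (by intro h; subst h; simp at hy)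
      have hgrow : p.natAbs + 1 ≤ (p * y).natAbs := by
        have h1 : (p * y).natAbs = p.natAbs * y.natAbs := Int.natAbs_mul p y
        have h2 : 1 ≤ p.natAbs := Nat.one_le_iff_ne_zero.mpr (by simpa using hp)
        have h3 : p.natAbs * 2 ≤ p.natAbs * y.natAbs := Nat.mul_le_mul (le_refl _) hy
        omega
      rw [ih (p * y) hp' (by omega)]
      constructor
      · rintro ⟨j, hj⟩
        exact ⟨j + 1, by rw [pow_succ]; rw [← hj]; ring⟩
      · rintro ⟨j, hj⟩
        rcases Nat.eq_zero_or_pos j with hj0 | hj0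
        · subst hj0; simp at hj; exact absurd hj hcond.1
        · refine ⟨j - 1, ?_⟩
          have hk1 : j - 1 + 1 = j := by omega
          have h' : y ^ (j - 1) * (p * y) = y ^ (j - 1 + 1) * p := by
            rw [pow_succ]; ring
          rw [h', hk1, hj]
    · rw [if_neg hcond]
      have hge : x.natAbs ≤ p.natAbs := by
        by_contra hlt
        exact hcond ⟨by rintro rfl; omega, by rw [abs_lt_abs_iff p x]; omega⟩
      rw [no_hi p hp hge]
      simp
  
-- ===== VERDICT (by name: the statement is the Claim_ definition above) =====
theorem is_power_spec : Claim_equal_is_power := by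
  intro x y _ hpre
  unfold Spec_is_power
  obtain ⟨h1, h2, h3⟩ := hpre
  by_cases hy1 : y = 1
  · subst hy1
    show is_power_go (x.natAbs + 1 + 1) x 1 = is_power_alt x 1
    simp [is_power_go, is_power_alt]
  by_cases hxy : x = y
  · subst hxy
    show is_power_go (x.natAbs + 1 + 1) x x = is_power_alt x x
    simp [is_power_go, is_power_alt, hy1]
  by_cases hy0 : y = 0
  · exact absurd ⟨hy0, fun hx0 => hxy (by rw [hx0, hy0])⟩ h1
  by_cases hyn1 : y = -1
  · subst hyn1
    have hx1 : x = 1 := by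
      rcases Decidable.not_and_iff_not_or_not.mp h3 with h | h
      · exact absurd rfl h
      rcases Decidable.not_and_iff_not_or_not.mp h with h | h
      · exact Decidable.not_not.mp h
      · exact absurd (Decidable.not_not.mp h) hxy
    subst hx1
    decide
  by_cases hx0 : x = 0
  · exact absurd ⟨hx0, hy0, hy1⟩ h2
  -- main case: |y| ≥ 2, x ≠ 0, x ≠ y
  have hy2 : 2 ≤ y.natAbs := by
    rcases Int.natAbs_eq y with h | h <;> omega
  have hA : is_power x y = true ↔ ∃ k, 2 ≤ k ∧ y ^ k = x := by
    show is_power_go (x.natAbs + 1 + 1) x y = true ↔ _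
    exact goA_char y hy2 (x.natAbs + 1) x hx0 (by omega)
  have hB : is_power_alt x y = true ↔ ∃ k, 2 ≤ k ∧ y ^ k = x := by
    unfold is_power_alt
    rw [if_neg (by simpa using hy1), if_neg (by simpa using hxy)]
    have hp0 : y * y ≠ 0 := mul_ne_zero hy0 hy0
    have := loopB_char x y hy2 hx0 (x.natAbs + 1) (y * y) hp0 (by omega)
    rw [show x.natAbs + 2 = x.natAbs + 1 + 1 from rfl, this]
    constructor
    · rintro ⟨j, hj⟩
      refine ⟨j + 2, by omega, ?_⟩
      rw [← hj]; ring
    · rintro ⟨k, hk, hpow⟩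
      refine ⟨k - 2, ?_⟩
      rw [← hpow, show y ^ (k-2) * (y * y) = y ^ (k-2) * y ^ 2 by ring, ← pow_add]
      congr 1; omega
  rw [Bool.eq_iff_iff, hA, hB]
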